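-- pv_equiv track=rewrite | github.com/ruY9527/practice-algorithm-together | python/array/OneAndZero_474.py | tryFindMaxForm
-- ===== SOURCE A (Python) =====
-- def tryFindMaxForm(strs,i,m,n):
--     if(i < 0):
--         return 0
--     numZero = 0
--     numOne = 0
--     strValue = strs[i]
--     for j in range(len(strValue)):
--         if(strValue[j] == '0'):
--             numZero += 1
--         else:
--             numOne += 1
--     if(m >= numZero and n >= numOne):
--         return max(tryFindMaxForm(strs,i-1,m,n),1+tryFindMaxForm(strs,i-1,m-numZero,n-numOne))
--     else:
--         return tryFindMaxForm(strs,i-1,m,n)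
-- ===== SOURCE B (Python) =====
-- def tryFindMaxForm(strs, i, m, n):
--     # Iterative DP over deduplicated (remaining_m, remaining_n) capacity states
--     # instead of branching recursion: a dict maps each reachable capacity pair to
--     # the best subset size reaching it; the answer is the max over all states.
--     states = {(m, n): 0}
--     k = i
--     while k >= 0:
--         s = strs[k]
--         z = sum(ch == '0' for ch in s)
--         o = len(s) - z
--         new = {}
--         for (mm, nn), c in states.items():
--             if (mm, nn) not in new or new[(mm, nn)] < c:
--                 new[(mm, nn)] = c
--             if mm >= z and nn >= o:
--                 key = (mm - z, nn - o)
--                 if key not in new or new[key] < c + 1: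
--                     new[key] = c + 1
--         states = new
--         k -= 1
--     return max(states.values())
-- ===== Notes on version B (the rewrite author's own statement) =====
-- stated objective: alternative
-- what changed: A's exponential take/skip recursion over subsets is replaced by an iterative dynamic program that walks the strings once, keeping a dict from each reachable (remaining zeros, remaining ones) capacity state to the best subset size and returning the max over all states.
import Mathlib
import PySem

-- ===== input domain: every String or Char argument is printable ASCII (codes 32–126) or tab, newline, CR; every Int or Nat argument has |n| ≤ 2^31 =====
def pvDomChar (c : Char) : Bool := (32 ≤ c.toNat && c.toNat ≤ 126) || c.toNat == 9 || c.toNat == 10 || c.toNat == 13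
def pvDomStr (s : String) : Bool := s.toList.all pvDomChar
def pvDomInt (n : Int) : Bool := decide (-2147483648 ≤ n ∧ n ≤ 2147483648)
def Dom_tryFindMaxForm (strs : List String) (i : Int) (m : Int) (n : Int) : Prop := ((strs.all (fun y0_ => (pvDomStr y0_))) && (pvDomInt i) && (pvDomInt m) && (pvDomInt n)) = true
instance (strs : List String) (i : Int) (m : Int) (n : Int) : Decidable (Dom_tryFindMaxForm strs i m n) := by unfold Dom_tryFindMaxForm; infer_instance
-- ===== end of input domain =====

-- B replaces A's branching take/skip recursion by an iterative loop over a dict of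
-- deduplicated remaining-capacity states (a different algorithm over the same inputs).

-- ===== PORT A =====
def tryFindMaxForm (strs : List String) (i : Int) (m : Int) (n : Int) : Int :=
  if _h : i < 0 then 0
  else
    match PySem.List.pyGet? strs i with
    | none => 0  -- strs[i] raises IndexError in Python; excluded by Pre_
    | some strValue =>
      let zo := strValue.toList.foldl
        (fun (p : Int × Int) c => if c = '0' then (p.1 + 1, p.2) else (p.1, p.2 + 1)) (0, 0)
      if zo.1 ≤ m ∧ zo.2 ≤ n then
        max (tryFindMaxForm strs (i - 1) m n)
            (1 + tryFindMaxForm strs (i - 1) (m - zo.1) (n - zo.2))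
      else
        tryFindMaxForm strs (i - 1) m n
termination_by (i + 1).toNat
decreasing_by all_goals omega

-- ===== PORT B =====
-- body of B's `for (mm, nn), c in states.items()` loop, folded over the items list
def altStep (z o : Int) (states : PySem.Dict (Int × Int) Int) : PySem.Dict (Int × Int) Int :=
  states.items.foldl
    (fun acc p =>
      let acc1 :=
        if acc.contains p.1 = false ∨ acc.getD p.1 0 < p.2 then acc.insert p.1 p.2 else acc
      if z ≤ p.1.1 ∧ o ≤ p.1.2 then
        if acc1.contains (p.1.1 - z, p.1.2 - o) = false ∨ acc1.getD (p.1.1 - z, p.1.2 - o) 0 < p.2 + 1 then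
          acc1.insert (p.1.1 - z, p.1.2 - o) (p.2 + 1)
        else acc1
      else acc1)
    PySem.Dict.empty

-- B's `while k >= 0` loop
def altLoop (strs : List String) (states : PySem.Dict (Int × Int) Int) (k : Int) :
    PySem.Dict (Int × Int) Int :=
  if _h : k < 0 then states
  else
    match PySem.List.pyGet? strs k with
    | none => states  -- strs[k] raises IndexError in Python; excluded by Pre_
    | some s =>
      let z : Int := (s.toList.map (fun ch => if ch = '0' then (1 : Int) else 0)).sum
      altLoop strs (altStep z (PySem.Str.len s - z) states) (k - 1)
termination_by (k + 1).toNat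
decreasing_by omega

def tryFindMaxForm_alt (strs : List String) (i : Int) (m : Int) (n : Int) : Int :=
  let final := altLoop strs (PySem.Dict.empty.insert (m, n) 0) i
  -- max(final.values()); the dict always has at least one entry, so the default is unreachable
  (PySem.List.max? final.values (fun x => x)).getD 0

-- ===== PRECONDITION & SPEC =====
-- Pre_ excludes exactly the inputs on which Python A raises IndexError (strs[i] with i ≥ len(strs)).
def Pre_tryFindMaxForm (strs : List String) (i : Int) (m : Int) (n : Int) : Prop :=
  i < (strs.length : Int)
instance (strs : List String) (i : Int) (m : Int) (n : Int) : Decidable (Pre_tryFindMaxForm strs i m n) := by unfold Pre_tryFindMaxForm; infer_instance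

def pvWitness_tryFindMaxForm : List String × Int × Int × Int := (["10", "0 a", "1"], 2, 2, 1)

def Spec_tryFindMaxForm (strs : List String) (i : Int) (m : Int) (n : Int) (out : Int) : Prop := out = tryFindMaxForm_alt strs i m n
instance (strs : List String) (i : Int) (m : Int) (n : Int) (out : Int) : Decidable (Spec_tryFindMaxForm strs i m n out) := by unfold Spec_tryFindMaxForm; infer_instance

-- ===== CLAIM (what is proved, stated in full; the proofs are below) =====
def Claim_equal_tryFindMaxForm : Prop := ∀ (strs : List String) (i : Int) (m : Int) (n : Int), Dom_tryFindMaxForm strs i m n → Pre_tryFindMaxForm strs i m n → Spec_tryFindMaxForm strs i m n (tryFindMaxForm strs i m n)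

-- ===== LEMMAS AND PROOFS =====

-- A's char loop produces exactly (number of '0's, length - number of '0's), as B computes them
lemma zo_count (s : String) :
    s.toList.foldl (fun (p : Int × Int) c => if c = '0' then (p.1 + 1, p.2) else (p.1, p.2 + 1)) (0, 0)
      = ((s.toList.map (fun ch => if ch = '0' then (1 : Int) else 0)).sum,
         PySem.Str.len s - (s.toList.map (fun ch => if ch = '0' then (1 : Int) else 0)).sum) := by
  have hfun : (fun (p : Int × Int) (c : Char) => if c = '0' then (p.1 + 1, p.2) else (p.1, p.2 + 1))
      = (fun (p : Int × Int) (c : Char) =>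
          ((fun (a : Int) (c : Char) => if decide (c = '0') = true then a + 1 else a) p.1 c,
           (fun (b : Int) (c : Char) => if decide (¬ c = '0') = true then b + 1 else b) p.2 c)) := by
    funext p c; by_cases h : c = '0' <;> simp [h]
  rw [hfun, PySem.List.foldl_prod_mk (fun (a : Int) (c : Char) => if decide (c = '0') = true then a + 1 else a) (fun (b : Int) (c : Char) => if decide (¬ c = '0') = true then b + 1 else b),
      PySem.List.foldl_count_if (fun c => decide (c = '0')),
      PySem.List.foldl_count_if (fun c => decide (¬ c = '0')),
      PySem.Str.len_eq]
  have hsum : (List.map (fun ch => if ch = '0' then (1 : Int) else 0) s.toList).sum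
      = ((s.toList.countP (fun c => decide (c = '0')) : Nat) : Int) := by
    simpa using PySem.List.sum_map_ite_one_zero (fun c => decide (c = '0')) s.toList
  have hlen := List.length_eq_countP_add_countP (l := s.toList) (fun c => decide (c = '0'))
  refine Prod.ext ?_ ?_
  · simp [hsum]
  · simp only [hsum, zero_add] at *
    simp only [decide_not, decide_eq_true_eq] at hlen ⊢
    omega

lemma A_nonneg_aux (strs : List String) (t : Nat) :
    ∀ (k m n : Int), (k + 1).toNat ≤ t → 0 ≤ tryFindMaxForm strs k m n := by
  induction t with
  | zero =>
      intro k m n h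
      rw [tryFindMaxForm]
      have hk : k < 0 := by omega
      simp [hk]
  | succ t ih =>
      intro k m n h
      rw [tryFindMaxForm]
      by_cases hk : k < 0
      · simp [hk]
      · rw [dif_neg hk]
        cases hg : PySem.List.pyGet? strs k with
        | none => simp
        | some s =>
            simp only []
            split
            · have h1 := ih (k - 1) m n (by omega)
              omega
            · exact ih (k - 1) m n (by omega)

lemma A_nonneg (strs : List String) (k m n : Int) : 0 ≤ tryFindMaxForm strs k m n :=
  A_nonneg_aux strs (k + 1).toNat k m n le_rfl

-- max over (value + f key) of a dict's entries, with floor 0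
def NV (f : Int × Int → Int) (d : PySem.Dict (Int × Int) Int) : Int :=
  (d.items.map (fun p => p.2 + f p.1)).foldl max 0

lemma foldl_max_shift (t : List Int) (a b : Int) :
    t.foldl max (max a b) = max (t.foldl max a) b := by
  induction t generalizing a with
  | nil => rfl
  | cons x t ih =>
      simp only [List.foldl_cons]
      rw [show max (max a b) x = max (max a x) b by omega, ih]

lemma foldl_max_replace (l : List ((Int × Int) × Int)) (f : Int × Int → Int)
    (key : Int × Int) (v v0 : Int) (hmem : (key, v0) ∈ l)
    (hnd : (l.map Prod.fst).Nodup) (hle : v0 ≤ v) (a : Int) :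
    ((l.map (fun p => if p.1 == key then (key, v) else p)).map (fun p => p.2 + f p.1)).foldl max a
      = max ((l.map (fun p => p.2 + f p.1)).foldl max a) (v + f key) := by
  induction l generalizing a with
  | nil => cases hmem
  | cons p t ih =>
      simp only [List.map_cons, List.foldl_cons]
      simp only [List.map_cons, List.nodup_cons] at hnd
      rcases List.mem_cons.mp hmem with hp | hp
      · subst hp
        have ht : t.map (fun q => if q.1 == key then (key, v) else q) = t := by
          refine (List.map_congr_left ?_).trans (List.map_id t)
          intro q hq
          have hq1 : ¬ (q.1 == key) = true := by
            simp only [beq_iff_eq]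
            intro h
            exact hnd.1 (h ▸ List.mem_map.mpr ⟨q, hq, rfl⟩)
          rw [if_neg hq1]
          rfl
        rw [if_pos (by simp), ht]
        rw [foldl_max_shift, foldl_max_shift]
        dsimp only
        omega
      · have hp1 : p.1 ≠ key := by
          intro h
          exact hnd.1 (h ▸ (List.mem_map.mpr ⟨(key, v0), hp, rfl⟩) : p.1 ∈ t.map Prod.fst)
        rw [if_neg (by simp [hp1])]
        exact ih hp hnd.2 (max a (p.2 + f p.1))

-- B's `if key not in new or new[key] < c: new[key] = c` raises the tracked max to the candidate
lemma NV_condInsert (f : Int × Int → Int) (acc : PySem.Dict (Int × Int) Int)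
    (key : Int × Int) (v : Int) (hnd : acc.keys.Nodup) :
    NV f (if acc.contains key = false ∨ acc.getD key 0 < v then acc.insert key v else acc)
      = max (NV f acc) (v + f key) := by
  by_cases hc : acc.contains key = true
  · have hg : acc.get? key = some (acc.getD key 0) := by
      cases h : acc.get? key with
      | none =>
          rw [PySem.Dict.contains_eq_isSome_get?, h] at hc
          simp at hc
      | some w => rw [PySem.Dict.getD_of_get?_eq_some acc 0 h]
    have hmem : (key, acc.getD key 0) ∈ acc.items := PySem.Dict.mem_items_of_get?_eq_some acc hg
    by_cases hv : acc.getD key 0 < v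
    · rw [if_pos (Or.inr hv)]
      unfold NV
      rw [PySem.Dict.items_insert_of_contains acc v hc]
      exact foldl_max_replace acc.items f key v (acc.getD key 0) hmem hnd (le_of_lt hv) 0
    · rw [if_neg (by simp [hc, hv])]
      have hle : v + f key ≤ NV f acc := by
        have h1 : acc.getD key 0 + f key ∈ acc.items.map (fun p => p.2 + f p.1) :=
          List.mem_map.mpr ⟨(key, acc.getD key 0), hmem, rfl⟩
        have h2 := (PySem.List.le_foldl_max (acc.items.map (fun p => p.2 + f p.1)) 0).2 _ h1
        unfold NV
        omega
      omega
  · rw [if_pos (Or.inl (by simpa using hc))]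
    unfold NV
    rw [PySem.Dict.items_insert_of_not_contains acc v (by simpa using hc)]
    rw [List.map_append, List.foldl_append]
    simp

lemma nodup_condInsert (acc : PySem.Dict (Int × Int) Int) (c : Prop) [Decidable c]
    (key : Int × Int) (v : Int) (hnd : acc.keys.Nodup) :
    (if c then acc.insert key v else acc).keys.Nodup := by
  split
  · exact PySem.Dict.nodup_keys_insert acc key v hnd
  · exact hnd

lemma NV_step (z o : Int) (f : Int × Int → Int) (acc : PySem.Dict (Int × Int) Int)
    (p : (Int × Int) × Int) (hnd : acc.keys.Nodup) :
    NV f ((fun acc p =>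
      let acc1 :=
        if acc.contains p.1 = false ∨ acc.getD p.1 0 < p.2 then acc.insert p.1 p.2 else acc
      if z ≤ p.1.1 ∧ o ≤ p.1.2 then
        if acc1.contains (p.1.1 - z, p.1.2 - o) = false ∨ acc1.getD (p.1.1 - z, p.1.2 - o) 0 < p.2 + 1 then
          acc1.insert (p.1.1 - z, p.1.2 - o) (p.2 + 1)
        else acc1
      else acc1) acc p)
      = max (NV f acc)
          (p.2 + (if z ≤ p.1.1 ∧ o ≤ p.1.2 then max (f p.1) (1 + f (p.1.1 - z, p.1.2 - o)) else f p.1)) := by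
  dsimp only
  have h1 := NV_condInsert f acc p.1 p.2 hnd
  have hnd1 := nodup_condInsert acc (acc.contains p.1 = false ∨ acc.getD p.1 0 < p.2) p.1 p.2 hnd
  by_cases hzo : z ≤ p.1.1 ∧ o ≤ p.1.2
  · rw [if_pos hzo, if_pos hzo]
    rw [NV_condInsert f _ (p.1.1 - z, p.1.2 - o) (p.2 + 1) hnd1, h1]
    omega
  · rw [if_neg hzo, if_neg hzo, h1]

lemma nodup_step (z o : Int) (acc : PySem.Dict (Int × Int) Int)
    (p : (Int × Int) × Int) (hnd : acc.keys.Nodup) :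
    ((fun acc p =>
      let acc1 :=
        if acc.contains p.1 = false ∨ acc.getD p.1 0 < p.2 then acc.insert p.1 p.2 else acc
      if z ≤ p.1.1 ∧ o ≤ p.1.2 then
        if acc1.contains (p.1.1 - z, p.1.2 - o) = false ∨ acc1.getD (p.1.1 - z, p.1.2 - o) 0 < p.2 + 1 then
          acc1.insert (p.1.1 - z, p.1.2 - o) (p.2 + 1)
        else acc1
      else acc1) acc p : PySem.Dict (Int × Int) Int).keys.Nodup := by
  dsimp only
  have hnd1 := nodup_condInsert acc (acc.contains p.1 = false ∨ acc.getD p.1 0 < p.2) p.1 p.2 hnd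
  split
  · exact nodup_condInsert _ _ _ _ hnd1
  · exact hnd1

lemma NV_fold (z o : Int) (f : Int × Int → Int) (l : List ((Int × Int) × Int)) :
    ∀ (acc : PySem.Dict (Int × Int) Int), acc.keys.Nodup →
    NV f (l.foldl (fun acc p =>
      let acc1 :=
        if acc.contains p.1 = false ∨ acc.getD p.1 0 < p.2 then acc.insert p.1 p.2 else acc
      if z ≤ p.1.1 ∧ o ≤ p.1.2 then
        if acc1.contains (p.1.1 - z, p.1.2 - o) = false ∨ acc1.getD (p.1.1 - z, p.1.2 - o) 0 < p.2 + 1 then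
          acc1.insert (p.1.1 - z, p.1.2 - o) (p.2 + 1)
        else acc1
      else acc1) acc)
      = (l.map (fun p => p.2 +
          (if z ≤ p.1.1 ∧ o ≤ p.1.2 then max (f p.1) (1 + f (p.1.1 - z, p.1.2 - o)) else f p.1))).foldl
          max (NV f acc) := by
  induction l with
  | nil => intro acc _; rfl
  | cons p t ih =>
      intro acc hnd
      simp only [List.foldl_cons, List.map_cons]
      rw [ih _ (nodup_step z o acc p hnd), NV_step z o f acc p hnd]

-- one pass of B's loop body turns the tracked maximum of c + f(state) into the
-- take/skip combination that A's recursion performs at the same string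
lemma NV_altStep (z o : Int) (f : Int × Int → Int) (d : PySem.Dict (Int × Int) Int) :
    NV f (altStep z o d)
      = (d.items.map (fun p => p.2 +
          (if z ≤ p.1.1 ∧ o ≤ p.1.2 then max (f p.1) (1 + f (p.1.1 - z, p.1.2 - o)) else f p.1))).foldl
          max 0 := by
  unfold altStep
  rw [NV_fold z o f d.items PySem.Dict.empty PySem.Dict.nodup_keys_empty]
  rfl

lemma nodup_altStep (z o : Int) (d : PySem.Dict (Int × Int) Int) :
    (altStep z o d).keys.Nodup := by
  unfold altStep
  generalize d.items = l
  have main : ∀ (acc : PySem.Dict (Int × Int) Int), acc.keys.Nodup →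
      (l.foldl (fun acc p =>
        let acc1 :=
          if acc.contains p.1 = false ∨ acc.getD p.1 0 < p.2 then acc.insert p.1 p.2 else acc
        if z ≤ p.1.1 ∧ o ≤ p.1.2 then
          if acc1.contains (p.1.1 - z, p.1.2 - o) = false ∨ acc1.getD (p.1.1 - z, p.1.2 - o) 0 < p.2 + 1 then
            acc1.insert (p.1.1 - z, p.1.2 - o) (p.2 + 1)
          else acc1
        else acc1) acc).keys.Nodup := by
    induction l with
    | nil => intro acc h; exact h
    | cons p t ih =>
        intro acc h
        simp only [List.foldl_cons]
        exact ih _ (nodup_step z o acc p h)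
  exact main PySem.Dict.empty PySem.Dict.nodup_keys_empty

-- the loop invariant: the best "c + A-value of the remaining prefix" over the state dict is constant
lemma altLoop_NV (strs : List String) (t : Nat) :
    ∀ (k : Int), (k + 1).toNat = t → k < (strs.length : Int) →
    ∀ (d : PySem.Dict (Int × Int) Int), d.keys.Nodup →
    NV (fun _ => 0) (altLoop strs d k) = NV (fun q => tryFindMaxForm strs k q.1 q.2) d := by
  induction t with
  | zero =>
      intro k ht _ d _
      have hk : k < 0 := by omega
      rw [altLoop, dif_pos hk]
      have hA : (fun (q : Int × Int) => tryFindMaxForm strs k q.1 q.2) = (fun _ => (0 : Int)) := by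
        funext q
        rw [tryFindMaxForm, dif_pos hk]
      rw [hA]
  | succ t ih =>
      intro k ht hlen d hnd
      have hk : ¬ k < 0 := by omega
      have hget : PySem.List.pyGet? strs k = some (strs[k.toNat]'(by omega)) := by
        have h1 := PySem.List.pyGet?_natCast strs k.toNat
        rw [show ((k.toNat : Nat) : Int) = k by omega] at h1
        rw [h1]
        exact List.getElem?_eq_getElem (by omega)
      rw [altLoop, dif_neg hk]
      simp only [hget]
      set s := strs[k.toNat]'(by omega) with hs
      set z : Int := (s.toList.map (fun ch => if ch = '0' then (1 : Int) else 0)).sum with hz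
      rw [ih (k - 1) (by omega) (by omega) _ (nodup_altStep _ _ d)]
      rw [NV_altStep]
      have hA : ∀ (q : Int × Int), tryFindMaxForm strs k q.1 q.2
          = if z ≤ q.1 ∧ (PySem.Str.len s - z) ≤ q.2 then
              max (tryFindMaxForm strs (k - 1) q.1 q.2)
                  (1 + tryFindMaxForm strs (k - 1) (q.1 - z) (q.2 - (PySem.Str.len s - z)))
            else tryFindMaxForm strs (k - 1) q.1 q.2 := by
        intro q
        rw [tryFindMaxForm, dif_neg hk]
        simp only [hget, zo_count s, ← hz]
      unfold NV
      congr 1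
      apply List.map_congr_left
      intro p _
      dsimp only
      rw [hA p.1]

lemma values_step (z o : Int) (acc : PySem.Dict (Int × Int) Int) (p : (Int × Int) × Int) :
    ∀ x ∈ ((fun acc (p : (Int × Int) × Int) =>
      let acc1 :=
        if acc.contains p.1 = false ∨ acc.getD p.1 0 < p.2 then acc.insert p.1 p.2 else acc
      if z ≤ p.1.1 ∧ o ≤ p.1.2 then
        if acc1.contains (p.1.1 - z, p.1.2 - o) = false ∨ acc1.getD (p.1.1 - z, p.1.2 - o) 0 < p.2 + 1 then
          acc1.insert (p.1.1 - z, p.1.2 - o) (p.2 + 1)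
        else acc1
      else acc1) acc p : PySem.Dict (Int × Int) Int).values,
      x = p.2 ∨ x = p.2 + 1 ∨ x ∈ acc.values := by
  intro x hx
  dsimp only at hx
  set acc1 := if acc.contains p.1 = false ∨ acc.getD p.1 0 < p.2 then acc.insert p.1 p.2 else acc with hdef
  have hacc1 : ∀ y ∈ acc1.values, y = p.2 ∨ y ∈ acc.values := by
    intro y hy
    rw [hdef] at hy
    split at hy
    · exact PySem.Dict.mem_values_insert acc p.1 p.2 y hy
    · exact Or.inr hy
  by_cases h1 : z ≤ p.1.1 ∧ o ≤ p.1.2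
  · rw [if_pos h1] at hx
    split at hx
    · rcases PySem.Dict.mem_values_insert _ _ _ x hx with h | h
      · exact Or.inr (Or.inl h)
      · rcases hacc1 x h with h' | h'
        · exact Or.inl h'
        · exact Or.inr (Or.inr h')
    · rcases hacc1 x hx with h' | h'
      · exact Or.inl h'
      · exact Or.inr (Or.inr h')
  · rw [if_neg h1] at hx
    rcases hacc1 x hx with h' | h'
    · exact Or.inl h'
    · exact Or.inr (Or.inr h')

lemma altStep_values_nonneg (z o : Int) (d : PySem.Dict (Int × Int) Int)
    (h : ∀ x ∈ d.values, 0 ≤ x) : ∀ x ∈ (altStep z o d).values, 0 ≤ x := by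
  unfold altStep
  have hitems : ∀ p ∈ d.items, 0 ≤ p.2 := by
    intro p hp
    exact h p.2 (List.mem_map.mpr ⟨p, hp, rfl⟩)
  have main : ∀ (l : List ((Int × Int) × Int)), (∀ p ∈ l, 0 ≤ p.2) →
      ∀ (acc : PySem.Dict (Int × Int) Int), (∀ x ∈ acc.values, 0 ≤ x) →
      ∀ x ∈ (l.foldl (fun acc p =>
        let acc1 :=
          if acc.contains p.1 = false ∨ acc.getD p.1 0 < p.2 then acc.insert p.1 p.2 else acc
        if z ≤ p.1.1 ∧ o ≤ p.1.2 then
          if acc1.contains (p.1.1 - z, p.1.2 - o) = false ∨ acc1.getD (p.1.1 - z, p.1.2 - o) 0 < p.2 + 1 then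
            acc1.insert (p.1.1 - z, p.1.2 - o) (p.2 + 1)
          else acc1
        else acc1) acc).values, 0 ≤ x := by
    intro l
    induction l with
    | nil => intro _ acc hacc x hx; exact hacc x hx
    | cons p t ih =>
        intro hl acc hacc x hx
        simp only [List.foldl_cons] at hx
        refine ih (fun q hq => hl q (List.mem_cons_of_mem p hq)) _ ?_ x hx
        intro y hy
        rcases values_step z o acc p y hy with h' | h' | h'
        · have := hl p List.mem_cons_self; omega
        · have := hl p List.mem_cons_self; omega
        · exact hacc y h'
  exact main d.items hitems PySem.Dict.empty (by simp [PySem.Dict.empty])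

lemma insert_items_ne_nil (d : PySem.Dict (Int × Int) Int) (k : Int × Int) (v : Int) :
    (d.insert k v).items ≠ [] := by
  by_cases hc : d.contains k = true
  · rw [PySem.Dict.items_insert_of_contains d v hc]
    intro h
    rw [List.map_eq_nil_iff] at h
    rw [PySem.Dict.contains_iff_mem_keys] at hc
    simp only [PySem.Dict.keys, h] at hc
    cases hc
  · rw [PySem.Dict.items_insert_of_not_contains d v (by simpa using hc)]
    simp

lemma step_items_ne_nil (z o : Int) (acc : PySem.Dict (Int × Int) Int) (p : (Int × Int) × Int)
    (h : acc.items ≠ []) :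
    ((fun acc (p : (Int × Int) × Int) =>
      let acc1 :=
        if acc.contains p.1 = false ∨ acc.getD p.1 0 < p.2 then acc.insert p.1 p.2 else acc
      if z ≤ p.1.1 ∧ o ≤ p.1.2 then
        if acc1.contains (p.1.1 - z, p.1.2 - o) = false ∨ acc1.getD (p.1.1 - z, p.1.2 - o) 0 < p.2 + 1 then
          acc1.insert (p.1.1 - z, p.1.2 - o) (p.2 + 1)
        else acc1
      else acc1) acc p : PySem.Dict (Int × Int) Int).items ≠ [] := by
  dsimp only
  set acc1 := if acc.contains p.1 = false ∨ acc.getD p.1 0 < p.2 then acc.insert p.1 p.2 else acc with hdef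
  have h1 : acc1.items ≠ [] := by
    rw [hdef]
    split
    · exact insert_items_ne_nil acc p.1 p.2
    · exact h
  split
  · split
    · exact insert_items_ne_nil acc1 _ _
    · exact h1
  · exact h1

lemma altStep_items_ne_nil (z o : Int) (d : PySem.Dict (Int × Int) Int)
    (h : d.items ≠ []) : (altStep z o d).items ≠ [] := by
  unfold altStep
  have main : ∀ (l : List ((Int × Int) × Int)) (acc : PySem.Dict (Int × Int) Int), acc.items ≠ [] →
      (l.foldl (fun acc p =>
        let acc1 :=
          if acc.contains p.1 = false ∨ acc.getD p.1 0 < p.2 then acc.insert p.1 p.2 else acc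
        if z ≤ p.1.1 ∧ o ≤ p.1.2 then
          if acc1.contains (p.1.1 - z, p.1.2 - o) = false ∨ acc1.getD (p.1.1 - z, p.1.2 - o) 0 < p.2 + 1 then
            acc1.insert (p.1.1 - z, p.1.2 - o) (p.2 + 1)
          else acc1
        else acc1) acc).items ≠ [] := by
    intro l
    induction l with
    | nil => intro acc hacc; exact hacc
    | cons p t ih =>
        intro acc hacc
        simp only [List.foldl_cons]
        exact ih _ (step_items_ne_nil z o acc p hacc)
  cases hitems : d.items with
  | nil => exact absurd hitems h
  | cons p t =>
      simp only [List.foldl_cons]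
      refine main t _ ?_
      dsimp only
      rw [if_pos (Or.inl (PySem.Dict.contains_empty p.1))]
      split
      · split
        · exact insert_items_ne_nil _ _ _
        · exact insert_items_ne_nil _ _ _
      · exact insert_items_ne_nil _ _ _

lemma altLoop_inv (strs : List String) (t : Nat) :
    ∀ (k : Int), (k + 1).toNat = t →
    ∀ (d : PySem.Dict (Int × Int) Int), (∀ x ∈ d.values, 0 ≤ x) → d.items ≠ [] →
    (∀ x ∈ (altLoop strs d k).values, 0 ≤ x) ∧ (altLoop strs d k).items ≠ [] := by
  induction t with
  | zero =>
      intro k ht d h0 h1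
      have hk : k < 0 := by omega
      rw [altLoop, dif_pos hk]
      exact ⟨h0, h1⟩
  | succ t ih =>
      intro k ht d h0 h1
      have hk : ¬ k < 0 := by omega
      rw [altLoop, dif_neg hk]
      cases hget : PySem.List.pyGet? strs k with
      | none => exact ⟨h0, h1⟩
      | some s =>
          simp only []
          exact ih (k - 1) (by omega) _
            (altStep_values_nonneg _ _ d h0) (altStep_items_ne_nil _ _ d h1)

-- ===== VERDICT (by name: the statement is the Claim_ definition above) =====
theorem tryFindMaxForm_spec : Claim_equal_tryFindMaxForm := by
  unfold Claim_equal_tryFindMaxForm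
  intro strs i m n _hdom hpre
  unfold Spec_tryFindMaxForm
  have hpre' : i < (strs.length : Int) := hpre
  set d0 : PySem.Dict (Int × Int) Int := PySem.Dict.empty.insert (m, n) 0 with hd0
  have h0 : d0.items = [((m, n), 0)] := rfl
  have hnd0 : d0.keys.Nodup := PySem.Dict.nodup_keys_insert _ _ _ PySem.Dict.nodup_keys_empty
  have hval0 : ∀ x ∈ d0.values, 0 ≤ x := by
    intro x hx
    simp only [PySem.Dict.values, h0] at hx
    simp at hx
    omega
  have hne0 : d0.items ≠ [] := by rw [h0]; simp
  have hL := altLoop_NV strs (i + 1).toNat i rfl hpre' d0 hnd0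
  have hR : NV (fun q => tryFindMaxForm strs i q.1 q.2) d0 = tryFindMaxForm strs i m n := by
    unfold NV
    rw [h0]
    simp only [List.map_cons, List.map_nil, List.foldl_cons, List.foldl_nil]
    have := A_nonneg strs i m n
    omega
  obtain ⟨hpos, hne⟩ := altLoop_inv strs (i + 1).toNat i rfl d0 hval0 hne0
  have halt : tryFindMaxForm_alt strs i m n
      = (PySem.List.max? (altLoop strs d0 i).values (fun x => x)).getD 0 := rfl
  cases hv : (altLoop strs d0 i).values with
  | nil =>
      exfalso
      apply hne
      simpa only [PySem.Dict.values, List.map_eq_nil_iff] using hv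
  | cons v tt =>
      have hNV : NV (fun _ => (0 : Int)) (altLoop strs d0 i) = tt.foldl max v := by
        unfold NV
        have hmap : (altLoop strs d0 i).items.map (fun p => p.2 + (0 : Int))
            = (altLoop strs d0 i).values := by
          simp only [PySem.Dict.values]
          exact List.map_congr_left (fun p _ => by omega)
        rw [hmap, hv]
        simp only [List.foldl_cons]
        rw [show max (0 : Int) v = max v 0 by omega, foldl_max_shift]
        have hv0 : 0 ≤ v := hpos v (hv ▸ List.mem_cons_self)
        have := (PySem.List.le_foldl_max tt v).1
        omega
      rw [halt, hv, PySem.List.max?_id_cons]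
      rw [← hR, ← hL, hNV]
      rfl
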